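-- pv_equiv track=rewrite | github.com/paulklemstine/factor | lean/demo/CrossCutting/demos/cross_cutting_demo.py | build_berggren_tree
-- ===== SOURCE A (Python) =====
-- def berggren_M1(a, b, c):
--     return (a - 2*b + 2*c, 2*a - b + 2*c, 2*a - 2*b + 3*c)
--
-- def berggren_M2(a, b, c):
--     return (a + 2*b + 2*c, 2*a + b + 2*c, 2*a + 2*b + 3*c)
--
-- def berggren_M3(a, b, c):
--     return (-a + 2*b + 2*c, -2*a + b + 2*c, -2*a + 2*b + 3*c)
--
-- def build_berggren_tree(depth=3):
--     """Build the Berggren tree to given depth."""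
--     root = (3, 4, 5)
--     tree = {(): root}
--     queue = [((), root)]
--
--     for _ in range(depth):
--         new_queue = []
--         for path, triple in queue:
--             a, b, c = triple
--             for i, transform in enumerate([berggren_M1, berggren_M2, berggren_M3]):
--                 new_path = path + (i,)
--                 new_triple = transform(a, b, c)
--                 tree[new_path] = new_triple
--                 new_queue.append((new_path, new_triple))
--         queue = new_queue
--
--     return tree
-- ===== SOURCE B (Python) =====
-- def berggren_M1(a, b, c):
--     return (a - 2*b + 2*c, 2*a - b + 2*c, 2*a - 2*b + 3*c)
--
-- def berggren_M2(a, b, c):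
--     return (a + 2*b + 2*c, 2*a + b + 2*c, 2*a + 2*b + 3*c)
--
-- def berggren_M3(a, b, c):
--     return (-a + 2*b + 2*c, -2*a + b + 2*c, -2*a + 2*b + 3*c)
--
-- def build_berggren_tree(depth=3):
--     """Build the Berggren tree to given depth."""
--     tree = {}
--     for d in range(max(depth, 0) + 1):
--         for n in range(3 ** d):
--             # path = the d base-3 digits of n, most significant first
--             path = []
--             m = n
--             for _ in range(d):
--                 path.append(m % 3)
--                 m = m // 3
--             path.reverse()
--             a, b, c = 3, 4, 5
--             for i in path:
--                 if i == 0: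
--                     a, b, c = berggren_M1(a, b, c)
--                 elif i == 1:
--                     a, b, c = berggren_M2(a, b, c)
--                 else:
--                     a, b, c = berggren_M3(a, b, c)
--             tree[tuple(path)] = (a, b, c)
--     return tree
-- ===== Notes on version B (the rewrite author's own statement) =====
-- stated objective: alternative
-- what changed: Replaces the BFS queue+dict construction with a direct closed-form enumeration: each node is addressed by a base-3 counter per level, its path is the counter's base-3 digits and its triple is recomputed by folding the transforms along that path, so no queue or parent state is kept.
import Mathlib
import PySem

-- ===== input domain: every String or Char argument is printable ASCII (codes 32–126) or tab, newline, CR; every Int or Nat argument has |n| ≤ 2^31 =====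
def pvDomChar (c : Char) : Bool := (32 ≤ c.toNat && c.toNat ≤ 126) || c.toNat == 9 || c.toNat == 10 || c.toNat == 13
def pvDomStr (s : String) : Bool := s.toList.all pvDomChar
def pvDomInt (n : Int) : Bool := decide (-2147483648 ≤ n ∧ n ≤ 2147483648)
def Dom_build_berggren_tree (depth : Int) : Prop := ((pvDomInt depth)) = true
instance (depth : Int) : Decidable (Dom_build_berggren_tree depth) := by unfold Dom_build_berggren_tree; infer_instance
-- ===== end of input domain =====

-- B replaces A's BFS queue+dict by a closed-form enumeration (base-3 counter per level,
-- path = digits, triple recomputed by folding transforms along the path); objective: alternative.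

-- shared module helpers (the three Berggren transforms)
def berggren_M1 (a b c : Int) : Int × Int × Int :=
  (a - 2*b + 2*c, 2*a - b + 2*c, 2*a - 2*b + 3*c)
def berggren_M2 (a b c : Int) : Int × Int × Int :=
  (a + 2*b + 2*c, 2*a + b + 2*c, 2*a + 2*b + 3*c)
def berggren_M3 (a b c : Int) : Int × Int × Int :=
  (-a + 2*b + 2*c, -2*a + b + 2*c, -2*a + 2*b + 3*c)

-- ===== PORT A =====
-- body of A's inner loop over one queue element (path, triple)
def aInner (acc : PySem.Dict (List Int) (Int × Int × Int) × List (List Int × (Int × Int × Int)))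
    (pt : List Int × (Int × Int × Int)) :
    PySem.Dict (List Int) (Int × Int × Int) × List (List Int × (Int × Int × Int)) :=
  let path := pt.1
  let (a, b, c) := pt.2
  (PySem.List.enumerate [berggren_M1, berggren_M2, berggren_M3]).foldl
    (fun acc2 it =>
      let new_path := path ++ [it.1]
      let new_triple := it.2 a b c
      (acc2.1.insert new_path new_triple, acc2.2 ++ [(new_path, new_triple)])) acc

-- one iteration of A's outer `for _ in range(depth)` loop: new_queue = [], scan the queue
def aStep (st : PySem.Dict (List Int) (Int × Int × Int) × List (List Int × (Int × Int × Int))) :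
    PySem.Dict (List Int) (Int × Int × Int) × List (List Int × (Int × Int × Int)) :=
  st.2.foldl aInner (st.1, ([] : List (List Int × (Int × Int × Int))))

def build_berggren_tree (depth : Int) : List (List Int × Int × Int × Int) :=
  let root : Int × Int × Int := (3, 4, 5)
  let tree := (PySem.Dict.empty : PySem.Dict (List Int) (Int × Int × Int)).insert ([] : List Int) root
  (((PySem.List.pyRange 0 depth 1).foldl (fun st _ => aStep st)
      (tree, [(([] : List Int), root)])).1).items

-- ===== PORT B =====
-- body of B's `for i in path:` loop (the if/elif/else chain)
def bApply (t : Int × Int × Int) (i : Int) : Int × Int × Int :=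
  if i = 0 then berggren_M1 t.1 t.2.1 t.2.2
  else if i = 1 then berggren_M2 t.1 t.2.1 t.2.2
  else berggren_M3 t.1 t.2.1 t.2.2

-- B's body for one level d: for n in range(3 ** d): digits loop, reverse, fold transforms, insert
def bOuter (tree : PySem.Dict (List Int) (Int × Int × Int)) (d : Int) :
    PySem.Dict (List Int) (Int × Int × Int) :=
  (PySem.List.pyRange 0 ((3 : Int) ^ d.toNat) 1).foldl   -- 3 ** d; d ≥ 0 on every call, so toNat is exact
    (fun tree n =>
      let pm := (PySem.List.pyRange 0 d 1).foldl
        (fun pm _ => (pm.1 ++ [PySem.Int.mod pm.2 3], PySem.Int.floordiv pm.2 3))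
        (([] : List Int), n)
      let path := pm.1.reverse
      let t := path.foldl bApply ((3 : Int), (4 : Int), (5 : Int))
      tree.insert path t) tree

def build_berggren_tree_alt (depth : Int) : List (List Int × Int × Int × Int) :=
  ((PySem.List.pyRange 0 (max depth 0 + 1) 1).foldl bOuter
      (PySem.Dict.empty : PySem.Dict (List Int) (Int × Int × Int))).items

-- ===== PRECONDITION & SPEC =====
def Spec_build_berggren_tree (depth : Int) (out : List (List Int × Int × Int × Int)) : Prop := out = build_berggren_tree_alt depth
instance (depth : Int) (out : List (List Int × Int × Int × Int)) : Decidable (Spec_build_berggren_tree depth out) := by unfold Spec_build_berggren_tree; infer_instance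

-- ===== CLAIM (what is proved, stated in full; the proofs are below) =====
def Claim_equal_build_berggren_tree : Prop := ∀ (depth : Int), Dom_build_berggren_tree depth → Spec_build_berggren_tree depth (build_berggren_tree depth)

-- ===== LEMMAS AND PROOFS =====

-- base-3 digits of n, least significant first, padded/truncated to length d
def dRev : Nat → Nat → List Int
  | 0, _ => []
  | d+1, n => ((n % 3 : Nat) : Int) :: dRev d (n / 3)

def digits (d n : Nat) : List Int := (dRev d n).reverse

def trip (p : List Int) : Int × Int × Int := p.foldl bApply (3, 4, 5)

def level (d : Nat) : List (List Int × (Int × Int × Int)) :=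
  (List.range (3 ^ d)).map (fun n => (digits d n, trip (digits d n)))

def upToE (m : Nat) : List (List Int × (Int × Int × Int)) :=
  (List.range m).flatMap level

def childL (pt : List Int × (Int × Int × Int)) : List (List Int × (Int × Int × Int)) :=
  [(pt.1 ++ [0], bApply pt.2 0), (pt.1 ++ [1], bApply pt.2 1), (pt.1 ++ [2], bApply pt.2 2)]

def insF (t : PySem.Dict (List Int) (Int × Int × Int)) (p : List Int × (Int × Int × Int)) :
    PySem.Dict (List Int) (Int × Int × Int) := t.insert p.1 p.2

theorem length_dRev (d n : Nat) : (dRev d n).length = d := by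
  induction d generalizing n with
  | zero => rfl
  | succ d ih => simp [dRev, ih]

theorem length_digits (d n : Nat) : (digits d n).length = d := by
  simp [digits, length_dRev]

theorem dRev_inj (d : Nat) : ∀ n m : Nat, n < 3 ^ d → m < 3 ^ d → dRev d n = dRev d m → n = m := by
  induction d with
  | zero => intro n m hn hm _; simp [pow_zero] at hn hm; omega
  | succ d ih =>
    intro n m hn hm h
    simp [dRev] at h
    have h1 : n % 3 = m % 3 := by exact_mod_cast h.1
    have h2 : n / 3 = m / 3 := by
      apply ih <;> first
        | exact h.2
        | (apply Nat.div_lt_of_lt_mul; rw [pow_succ] at *; omega)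
    omega

theorem digits_inj (d : Nat) (n m : Nat) (hn : n < 3 ^ d) (hm : m < 3 ^ d)
    (h : digits d n = digits d m) : n = m := by
  apply dRev_inj d n m hn hm
  have := congrArg List.reverse h
  simpa [digits] using this

theorem digits_child (d n i : Nat) (hi : i < 3) :
    digits (d+1) (3*n + i) = digits d n ++ [(i : Int)] := by
  have h1 : (3*n + i) % 3 = i := by omega
  have h2 : (3*n + i) / 3 = n := by omega
  simp [digits, dRev, h1, h2]

theorem trip_append (p : List Int) (i : Int) : trip (p ++ [i]) = bApply (trip p) i := by
  simp [trip, List.foldl_append]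

-- generic base-3 refinement of a range
theorem flat3 {α : Type} (g : Nat → α) :
    ∀ k : Nat, (List.range k).flatMap (fun n => [g (3*n), g (3*n+1), g (3*n+2)]) =
      (List.range (3*k)).map g := by
  intro k
  induction k with
  | zero => simp
  | succ k ih =>
    rw [List.range_succ, List.flatMap_append, ih]
    have : 3 * (k + 1) = (3*k + 2) + 1 := by ring
    rw [this, List.range_succ, (by ring : 3*k + 2 = (3*k + 1) + 1), List.range_succ,
        (by ring : 3*k + 1 = (3*k) + 1), List.range_succ]
    simp

theorem level_succ (d : Nat) : level (d+1) = (level d).flatMap childL := by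
  have key : ∀ n : Nat, childL (digits d n, trip (digits d n)) =
      [ (digits (d+1) (3*n), trip (digits (d+1) (3*n))),
        (digits (d+1) (3*n+1), trip (digits (d+1) (3*n+1))),
        (digits (d+1) (3*n+2), trip (digits (d+1) (3*n+2))) ] := by
    intro n
    have c0 := digits_child d n 0 (by omega)
    have c1 := digits_child d n 1 (by omega)
    have c2 := digits_child d n 2 (by omega)
    simp only [Nat.add_zero] at c0
    simp [childL, c0, c1, c2, trip_append]
  calc level (d+1) = (List.range (3 * 3 ^ d)).map (fun n => (digits (d+1) n, trip (digits (d+1) n))) := by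
        simp [level, pow_succ, Nat.mul_comm]
    _ = (List.range (3 ^ d)).flatMap (fun n =>
          [ (digits (d+1) (3*n), trip (digits (d+1) (3*n))),
            (digits (d+1) (3*n+1), trip (digits (d+1) (3*n+1))),
            (digits (d+1) (3*n+2), trip (digits (d+1) (3*n+2))) ]) := by
        exact (flat3 (fun n => (digits (d+1) n, trip (digits (d+1) n))) (3 ^ d)).symm
    _ = (level d).flatMap childL := by
        simp [level, List.flatMap_map, key]

theorem aInner_eq (acc : PySem.Dict (List Int) (Int × Int × Int) × List (List Int × (Int × Int × Int)))
    (pt : List Int × (Int × Int × Int)) :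
    aInner acc pt = (childL pt).foldl (fun s p => (s.1.insert p.1 p.2, s.2 ++ [p])) acc := by
  obtain ⟨tr, nq⟩ := acc
  obtain ⟨p, a, b, c⟩ := pt
  simp [aInner, childL, bApply, PySem.List.enumerate, List.foldl]

theorem pairFold (l : List (List Int × (Int × Int × Int)))
    (tr : PySem.Dict (List Int) (Int × Int × Int)) (nq : List (List Int × (Int × Int × Int))) :
    l.foldl (fun s p => (s.1.insert p.1 p.2, s.2 ++ [p])) (tr, nq) = (l.foldl insF tr, nq ++ l) := by
  induction l generalizing tr nq with
  | nil => simp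
  | cons p l ih => simp [List.foldl_cons, ih, insF]

theorem innerA (q : List (List Int × (Int × Int × Int)))
    (tr : PySem.Dict (List Int) (Int × Int × Int)) (nq : List (List Int × (Int × Int × Int))) :
    q.foldl aInner (tr, nq) = ((q.flatMap childL).foldl insF tr, nq ++ q.flatMap childL) := by
  induction q generalizing tr nq with
  | nil => simp
  | cons pt q ih =>
    rw [List.foldl_cons, aInner_eq, pairFold, ih]
    simp [List.flatMap_cons, List.foldl_append]

theorem fst_mem_level {p : List Int × (Int × Int × Int)} {d : Nat} (h : p ∈ level d) :
    p.1.length = d := by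
  simp [level] at h
  obtain ⟨n, _, hn⟩ := h
  rw [← hn]
  simp [length_digits]

theorem upToE_succ (d : Nat) : upToE (d+1) = upToE d ++ level d := by
  simp [upToE, List.range_succ]

theorem mem_keys_upToE {k : List Int} {d : Nat}
    (h : k ∈ (upToE d).map Prod.fst) : k.length < d := by
  simp only [upToE, List.map_flatMap, List.mem_flatMap] at h
  obtain ⟨e, he, hk⟩ := h
  simp only [List.mem_range] at he
  simp only [List.mem_map] at hk
  obtain ⟨p, hp, hk⟩ := hk
  rw [← hk, fst_mem_level hp]
  exact he

theorem nodup_level_fst (d : Nat) : ((level d).map Prod.fst).Nodup := by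
  have : (level d).map Prod.fst = (List.range (3 ^ d)).map (digits d) := by
    simp [level, List.map_map, Function.comp]
  rw [this]
  apply List.Nodup.map_on
  · intro n hn m hm h
    exact digits_inj d n m (List.mem_range.mp hn) (List.mem_range.mp hm) h
  · exact List.nodup_range

theorem insertLevel (tr : PySem.Dict (List Int) (Int × Int × Int)) (d : Nat)
    (h : tr.items = upToE d) :
    ((level d).foldl insF tr).items = upToE (d+1) := by
  have fresh : ∀ p ∈ level d, tr.contains p.1 = false := by
    intro p hp
    by_contra hc
    have : tr.contains p.1 = true := by
      cases hcb : tr.contains p.1 with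
      | true => rfl
      | false => exact absurd hcb hc
    rw [PySem.Dict.contains_iff_mem_keys] at this
    have hk : p.1 ∈ (upToE d).map Prod.fst := by
      have : p.1 ∈ tr.items.map Prod.fst := this
      rwa [h] at this
    have := mem_keys_upToE hk
    rw [fst_mem_level hp] at this
    omega
  have := PySem.Dict.items_foldl_insert_fresh (level d) Prod.fst Prod.snd tr fresh (nodup_level_fst d)
  rw [show insF = (fun (d : PySem.Dict (List Int) (Int × Int × Int)) a => d.insert (Prod.fst a) (Prod.snd a)) from rfl,
      this, h, upToE_succ]
  congr 1
  simp

theorem foldl_const_iterate {α β : Type} (g : α → α) (l : List β) (init : α) :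
    l.foldl (fun s _ => g s) init = g^[l.length] init := by
  induction l generalizing init with
  | nil => rfl
  | cons x l ih => simp [List.foldl_cons, ih, Function.iterate_succ_apply]

theorem aIter (k : Nat) :
    (aStep^[k] ((PySem.Dict.empty : PySem.Dict (List Int) (Int × Int × Int)).insert ([] : List Int) (3, 4, 5),
        [(([] : List Int), ((3 : Int), (4 : Int), (5 : Int)))])).1.items = upToE (k+1) ∧
    (aStep^[k] ((PySem.Dict.empty : PySem.Dict (List Int) (Int × Int × Int)).insert ([] : List Int) (3, 4, 5),
        [(([] : List Int), ((3 : Int), (4 : Int), (5 : Int)))])).2 = level k := by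
  induction k with
  | zero =>
    constructor
    · show (PySem.Dict.empty.insert ([] : List Int) ((3:Int),(4:Int),(5:Int))).items = upToE 1
      decide
    · show [(([] : List Int), ((3 : Int), (4 : Int), (5 : Int)))] = level 0
      decide
  | succ k ih =>
    obtain ⟨h1, h2⟩ := ih
    rw [Function.iterate_succ_apply']
    set st := aStep^[k] _ with hst
    have hstep : aStep st = ((st.2.flatMap childL).foldl insF st.1, [] ++ st.2.flatMap childL) := by
      rw [aStep, innerA]
    rw [hstep, h2, ← level_succ]
    constructor
    · exact insertLevel st.1 (k+1) h1
    · simp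

-- B's digits loop as an iterate: starting from (acc, n) it appends the base-3 digits LSB-first
theorem bDigitsIter (m : Nat) : ∀ (n : Nat) (acc : List Int),
    (fun pm : List Int × Int => (pm.1 ++ [PySem.Int.mod pm.2 3], PySem.Int.floordiv pm.2 3))^[m]
      (acc, (n : Int)) = (acc ++ dRev m n, ((n / 3 ^ m : Nat) : Int)) := by
  induction m with
  | zero => intro n acc; simp [dRev]
  | succ m ih =>
    intro n acc
    rw [Function.iterate_succ_apply]
    have hm : PySem.Int.mod ((n : Nat) : Int) 3 = ((n % 3 : Nat) : Int) := by
      exact_mod_cast PySem.Int.mod_natCast n 3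
    have hd : PySem.Int.floordiv ((n : Nat) : Int) 3 = ((n / 3 : Nat) : Int) := by
      exact_mod_cast PySem.Int.floordiv_natCast n 3
    show (fun pm : List Int × Int => (pm.1 ++ [PySem.Int.mod pm.2 3], PySem.Int.floordiv pm.2 3))^[m]
        (acc ++ [PySem.Int.mod (n : Int) 3], PySem.Int.floordiv (n : Int) 3) = _
    rw [hm, hd, ih (n / 3) (acc ++ [((n % 3 : Nat) : Int)])]
    have h1 : acc ++ [((n % 3 : Nat) : Int)] ++ dRev m (n / 3) = acc ++ dRev (m + 1) n := by
      simp [dRev]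
    have h2 : n / 3 / 3 ^ m = n / 3 ^ (m + 1) := by
      rw [Nat.div_div_eq_div_mul, pow_succ, Nat.mul_comm]
    rw [h1, h2]

theorem bOuter_level (tr : PySem.Dict (List Int) (Int × Int × Int)) (m : Nat) :
    bOuter tr (m : Int) = (level m).foldl insF tr := by
  unfold bOuter
  have hpow : (3 : Int) ^ ((m : Int)).toNat = (((3 : Nat) ^ m : Nat) : Int) := by
    rw [Int.toNat_natCast]; push_cast; ring
  rw [hpow, PySem.List.pyRange_zero_nat (3 ^ m), List.foldl_map, level, List.foldl_map]
  apply List.foldl_ext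
  intro tree k hk
  have hpm : (PySem.List.pyRange 0 (m : Int) 1).foldl
      (fun pm _ => (pm.1 ++ [PySem.Int.mod pm.2 3], PySem.Int.floordiv pm.2 3))
      (([] : List Int), (k : Int))
      = (([] : List Int) ++ dRev m k, ((k / 3 ^ m : Nat) : Int)) := by
    rw [foldl_const_iterate, PySem.List.length_pyRange_one]
    have : ((m : Int) - 0).toNat = m := by omega
    rw [this]
    exact bDigitsIter m k []
  show tree.insert
      (((PySem.List.pyRange 0 (m : Int) 1).foldl
        (fun pm _ => (pm.1 ++ [PySem.Int.mod pm.2 3], PySem.Int.floordiv pm.2 3))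
        (([] : List Int), (k : Int))).1.reverse)
      ((((PySem.List.pyRange 0 (m : Int) 1).foldl
        (fun pm _ => (pm.1 ++ [PySem.Int.mod pm.2 3], PySem.Int.floordiv pm.2 3))
        (([] : List Int), (k : Int))).1.reverse).foldl bApply ((3 : Int), (4 : Int), (5 : Int)))
    = insF tree (digits m k, trip (digits m k))
  rw [hpm]
  simp [digits, trip, insF]

theorem bIter (m : Nat) :
    ((PySem.List.pyRange 0 (m : Int) 1).foldl bOuter
      (PySem.Dict.empty : PySem.Dict (List Int) (Int × Int × Int))).items = upToE m := by
  induction m with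
  | zero =>
    rw [PySem.List.pyRange_one_eq_nil (by omega)]
    decide
  | succ m ih =>
    have : ((m + 1 : Nat) : Int) = (m : Int) + 1 := by push_cast; ring
    rw [this, PySem.List.pyRange_one_succ_right (by positivity), List.foldl_append]
    simp only [List.foldl_cons, List.foldl_nil]
    rw [bOuter_level]
    exact insertLevel _ m ih

-- ===== VERDICT (by name: the statement is the Claim_ definition above) =====
theorem build_berggren_tree_spec : Claim_equal_build_berggren_tree := by
  intro depth _
  unfold Spec_build_berggren_tree build_berggren_tree build_berggren_tree_alt
  set K : Nat := depth.toNat with hK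
  have hmax : max depth 0 + 1 = ((K + 1 : Nat) : Int) := by omega
  rw [hmax, bIter]
  show (((PySem.List.pyRange 0 depth 1).foldl (fun st _ => aStep st)
      ((PySem.Dict.empty : PySem.Dict (List Int) (Int × Int × Int)).insert ([] : List Int) (3, 4, 5),
       [(([] : List Int), ((3 : Int), (4 : Int), (5 : Int)))])).1).items = upToE (K + 1)
  rw [foldl_const_iterate]
  have hlen : (PySem.List.pyRange 0 depth 1).length = K := by
    rw [PySem.List.length_pyRange_one]; omega
  rw [hlen]
  exact (aIter K).1
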